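-- pv_equiv track=rewrite | github.com/Da1anna/Data-Structed-and-Algorithm_python | 基础知识/贪心算法/经典例题.py | junfen_cards
-- ===== SOURCE A (Python) =====
-- def junfen_cards(lst:list) -> int:
--     k = sum(lst)//len(lst)
--     n = 0
--     for i in range(len(lst)-1):
--         need = k - lst[i]
--         if need != 0:
--             lst[i] = k
--             lst[i+1] = lst[i+1] - need
--             n += 1
--     return n
-- ===== SOURCE B (Python) =====
-- def junfen_cards(lst: list) -> int:
--     # Prefix-sum imbalance count (no carry-by-mutation), then write the
--     # final equalized state directly (same observable mutation as A).
--     total = sum(lst)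
--     k = total // len(lst)
--     n = 0
--     prefix = 0
--     for i, x in enumerate(lst[:-1]):
--         prefix += x
--         if prefix != (i + 1) * k:
--             n += 1
--     for i in range(len(lst) - 1):
--         lst[i] = k
--     lst[-1] = total - (len(lst) - 1) * k
--     return n
-- ===== Notes on version B (the rewrite author's own statement) =====
-- stated objective: alternative
-- what changed: B replaces A's carry-by-mutation scan (each step rewrites lst[i] and pushes the deficit into lst[i+1]) with a pure prefix-sum pass that counts indices where prefix != (i+1)*k, and then writes the final equalized state directly; return-value equivalence is proved, and Pre_ excludes the empty list on which A raises ZeroDivisionError.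
import Mathlib
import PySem

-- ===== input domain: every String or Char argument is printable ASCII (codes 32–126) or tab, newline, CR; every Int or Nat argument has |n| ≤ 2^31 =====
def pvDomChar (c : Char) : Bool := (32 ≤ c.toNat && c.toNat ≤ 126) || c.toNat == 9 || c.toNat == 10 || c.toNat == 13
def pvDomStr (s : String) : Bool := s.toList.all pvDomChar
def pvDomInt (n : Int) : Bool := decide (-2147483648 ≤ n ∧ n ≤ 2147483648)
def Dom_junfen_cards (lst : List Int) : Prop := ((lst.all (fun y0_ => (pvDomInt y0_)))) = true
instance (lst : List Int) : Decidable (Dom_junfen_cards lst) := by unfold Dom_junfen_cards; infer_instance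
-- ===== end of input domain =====

-- B counts imbalanced prefixes with a pure prefix-sum pass instead of A's carry-by-mutation
-- scan; equivalence here is about the RETURN value (both Pythons leave lst in the same
-- equalized final state, which the ports do not model).

-- ===== PORT A =====
-- literal port of A: fold over range(len(lst)-1) carrying the mutated list and the counter
def junfen_cards (lst : List Int) : Int :=
  let k : Int := PySem.Int.floordiv lst.sum (lst.length : Int)
  let st :=
    (PySem.List.pyRange 0 ((lst.length : Int) - 1) 1).foldl
      (fun (st : List Int × Int) (i : Int) =>
        let need := k - PySem.List.pyGetD st.1 i 0
        if need ≠ 0 then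
          let l1 := PySem.List.pySetD st.1 i k
          let l2 := PySem.List.pySetD l1 (i + 1) (PySem.List.pyGetD l1 (i + 1) 0 - need)
          (l2, st.2 + 1)
        else st)
      (lst, 0)
  st.2

-- ===== PORT B =====
-- the for-loop of Source B over enumerate(lst[:-1]) as structural recursion carrying (i, prefix, n)
def junfenAltLoop (k : Int) (i : Nat) (pre n : Int) : List Int → Int
  | [] => n
  | x :: t =>
      let p := pre + x
      junfenAltLoop k (i + 1) p (if p ≠ ((i : Int) + 1) * k then n + 1 else n) t

def junfen_cards_alt (lst : List Int) : Int :=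
  let total := lst.sum
  let k : Int := PySem.Int.floordiv total (lst.length : Int)
  junfenAltLoop k 0 0 0 lst.dropLast

-- ===== PRECONDITION & SPEC =====
-- Pre_ excludes the empty list, on which A raises ZeroDivisionError (len(lst) = 0).
def Pre_junfen_cards (lst : List Int) : Prop := lst ≠ []
instance (lst : List Int) : Decidable (Pre_junfen_cards lst) := by unfold Pre_junfen_cards; infer_instance
def pvWitness_junfen_cards : List Int := [3, 1, 2]

def Spec_junfen_cards (lst : List Int) (out : Int) : Prop := out = junfen_cards_alt lst
instance (lst : List Int) (out : Int) : Decidable (Spec_junfen_cards lst out) := by unfold Spec_junfen_cards; infer_instance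

-- ===== CLAIM (what is proved, stated in full; the proofs are below) =====
def Claim_equal_junfen_cards : Prop := ∀ (lst : List Int), Dom_junfen_cards lst → Pre_junfen_cards lst → Spec_junfen_cards lst (junfen_cards lst)

-- ===== LEMMAS AND PROOFS =====

-- setting / reading at the seam of 'pre ++ x :: post'
theorem set_at_mid {a : Type} (pre : List a) (x v : a) (post : List a) :
    (pre ++ x :: post).set pre.length v = pre ++ v :: post := by
  induction pre with
  | nil => simp
  | cons h t ih => simp [ih]

theorem getD_at_mid {a : Type} [Inhabited a] (pre : List a) (x : a) (post : List a) (d : a) :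
    (pre ++ x :: post).getD pre.length d = x := by
  induction pre with
  | nil => simp
  | cons h t ih => simp only [List.length_cons, List.cons_append, List.getD_cons_succ]; exact ih

-- B's loop over xs ++ ys: the prefix and index advance by xs.sum and xs.length
theorem junfenAltLoop_append (k : Int) (xs : List Int) :
    ∀ (ys : List Int) (i : Nat) (pre n : Int),
      junfenAltLoop k i pre n (xs ++ ys)
        = junfenAltLoop k (i + xs.length) (pre + xs.sum) (junfenAltLoop k i pre n xs) ys := by
  induction xs with
  | nil => intro ys i pre n; simp [junfenAltLoop]
  | cons x t ih =>
      intro ys i pre n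
      simp only [List.cons_append, junfenAltLoop, ih, List.length_cons, List.sum_cons]
      ring_nf

-- A's fold invariant: after the first m steps the list is m copies of k, then
-- (take (m+1) lst).sum - m*k, then the untouched tail; the counter agrees with B's
-- prefix-sum loop on the first m elements.
theorem junfen_loop_invariant (L : List Int) (k : Int) (m : Nat) (hm : m < L.length) :
    (PySem.List.pyRange 0 (m : Int) 1).foldl
      (fun (st : List Int × Int) (i : Int) =>
        let need := k - PySem.List.pyGetD st.1 i 0
        if need ≠ 0 then
          let l1 := PySem.List.pySetD st.1 i k
          let l2 := PySem.List.pySetD l1 (i + 1) (PySem.List.pyGetD l1 (i + 1) 0 - need)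
          (l2, st.2 + 1)
        else st)
      (L, 0)
    = (List.replicate m k ++ ((L.take (m + 1)).sum - (m : Int) * k) :: L.drop (m + 1),
       junfenAltLoop k 0 0 0 (L.take m)) := by
  induction m with
  | zero =>
      simp [PySem.List.pyRange_one_eq_nil, junfenAltLoop]
      cases L with
      | nil => simp at hm
      | cons a t => simp
  | succ m ih =>
      have hm' : m < L.length := Nat.lt_of_succ_lt hm
      have hrange : PySem.List.pyRange 0 ((m : Nat) + 1 : Int) 1
          = PySem.List.pyRange 0 (m : Int) 1 ++ [(m : Int)] := by
        exact PySem.List.pyRange_one_succ_right (by positivity)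
      have hcast : ((m + 1 : Nat) : Int) = ((m : Nat) : Int) + 1 := by push_cast; ring
      rw [hcast, hrange, List.foldl_append, ih hm']
      simp only [List.foldl_cons, List.foldl_nil]
      set S := (L.take (m + 1)).sum with hS
      obtain ⟨y, t', hdrop⟩ : ∃ y t', L.drop (m + 1) = y :: t' := by
        cases hd : L.drop (m + 1) with
        | nil => exfalso; have := List.drop_eq_nil_iff.mp hd; omega
        | cons y t' => exact ⟨y, t', rfl⟩
      have hyval : L[m + 1]'hm = y := by
        have h2 := List.drop_eq_getElem_cons hm
        rw [hdrop] at h2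
        simp only [List.cons.injEq] at h2
        exact h2.1.symm
      have htake1 : L.take (m + 1) = L.take m ++ [L[m]'hm'] := by
        rw [List.take_add_one]; simp [List.getElem?_eq_getElem hm']
      have htake2 : L.take (m + 2) = L.take (m + 1) ++ [y] := by
        rw [List.take_add_one]; simp [List.getElem?_eq_getElem hm, hyval]
      have hdrop2 : L.drop (m + 2) = t' := by
        have h3 := congrArg List.tail hdrop
        rwa [List.tail_drop] at h3
      have hlen_take : (L.take m).length = m := by
        simp [List.length_take]; omega
      have hsum1 : (L.take m).sum + L[m]'hm' = S := by
        rw [hS, htake1, List.sum_append, List.sum_cons, List.sum_nil]; ring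
      have hget : PySem.List.pyGetD
          (List.replicate m k ++ (S - (m : Int) * k) :: L.drop (m + 1)) ((m : Nat) : Int) 0
          = S - (m : Int) * k := by
        rw [PySem.List.pyGetD_natCast]
        have h4 := getD_at_mid (List.replicate m k) (S - (m : Int) * k) (L.drop (m + 1)) 0
        simp only [List.length_replicate] at h4
        exact h4
      have hB : junfenAltLoop k 0 0 0 (L.take (m + 1))
          = if S ≠ ((m : Int) + 1) * k then junfenAltLoop k 0 0 0 (L.take m) + 1
            else junfenAltLoop k 0 0 0 (L.take m) := by
        rw [htake1, junfenAltLoop_append]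
        simp only [junfenAltLoop, hlen_take, zero_add]
        rw [hsum1]
      by_cases hne : S = ((m : Int) + 1) * k
      · -- need = 0 : state untouched
        rw [if_neg (by simp only [hget]; intro h; apply h; linarith)]
        rw [hB, if_neg (by simp [hne])]
        refine Prod.ext ?_ rfl
        show List.replicate m k ++ (S - (m : Int) * k) :: L.drop (m + 1)
            = List.replicate (m + 1) k ++ ((L.take (m + 1 + 1)).sum - ((m + 1 : Nat) : Int) * k) :: L.drop (m + 1 + 1)
        have hcell : S - (m : Int) * k = k := by linarith
        have hcell2 : (L.take (m + 2)).sum - ((m + 1 : Nat) : Int) * k = y := by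
          rw [htake2]; push_cast; simp [← hS]; linarith
        rw [hcell, show m + 1 + 1 = m + 2 from rfl, hcell2, hdrop2, hdrop,
          List.replicate_succ' ]
        simp
      · -- need ≠ 0 : rewrite both cells
        rw [if_pos (by simp only [hget]; intro h; apply hne; linarith)]
        rw [hB, if_pos (by simp [hne])]
        refine Prod.ext ?_ rfl
        simp only [hget, PySem.List.pySetD_natCast]
        have hset1 : (List.replicate m k ++ (S - (m : Int) * k) :: L.drop (m + 1)).set m k
            = List.replicate (m + 1) k ++ y :: t' := by
          have := set_at_mid (List.replicate m k) (S - (m : Int) * k) k (L.drop (m + 1))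
          simp only [List.length_replicate] at this
          rw [this, hdrop, List.replicate_succ']
          simp
        rw [hset1]
        have hcast2 : ((m : Nat) : Int) + 1 = ((m + 1 : Nat) : Int) := by push_cast; ring
        rw [hcast2, PySem.List.pyGetD_natCast, PySem.List.pySetD_natCast]
        have hgm1 : (List.replicate (m + 1) k ++ y :: t').getD (m + 1) 0 = y := by
          have h5 := getD_at_mid (List.replicate (m + 1) k) y t' 0
          simp only [List.length_replicate] at h5
          exact h5
        rw [hgm1]
        have hset2 := set_at_mid (List.replicate (m + 1) k) y (y - (k - (S - (m : Int) * k))) t'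
        simp only [List.length_replicate] at hset2
        rw [hset2]
        have hcell2 : y - (k - (S - (m : Int) * k)) = (L.take (m + 1 + 1)).sum - ((m + 1 : Nat) : Int) * k := by
          rw [show m + 1 + 1 = m + 2 from rfl, htake2]; push_cast; simp [← hS]; ring
        rw [hcell2, show m + 1 + 1 = m + 2 from rfl, hdrop2]

-- ===== VERDICT (by name: the statement is the Claim_ definition above) =====
theorem junfen_cards_spec : Claim_equal_junfen_cards := by
  intro lst _ hpre
  show junfen_cards lst = junfen_cards_alt lst
  have hlen : 0 < lst.length := List.length_pos_iff.mpr hpre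
  simp only [junfen_cards, junfen_cards_alt]
  have hcast : ((lst.length : Int) - 1) = ((lst.length - 1 : Nat) : Int) := by
    push_cast [hlen]; omega
  rw [hcast, junfen_loop_invariant lst _ (lst.length - 1) (by omega)]
  simp [List.dropLast_eq_take]
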